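-- pv_equiv track=rewrite | github.com/JustMrNone/Interview | Arrays/map.py | assignHeights
-- ===== SOURCE A (Python) =====
-- from collections import deque
-- from typing import List
--
-- def assignHeights(isWater: List[List[int]]) -> List[List[int]]:
--     rows = len(isWater)
--     cols = len(isWater[0])
--
--     # This is the Result matrix with -1 aka: unvisited cells
--     heights = [[-1] * cols for _ in range(rows)]
--
--     # init queue for BFS
--     bfs_queue = deque()
--
--     # Init the queue with all the water cells
--     for r in range(rows):
--         for c in range(cols):
--             if isWater[r][c] == 1:
--                 bfs_queue.append((r, c))
--                 # problem concluded that water cells have height 0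
--                 heights[r][c] = 0
--
--     # Directions (north, east, south, west)
--     directions = [(-1, 0), (1, 0), (0, -1), (0, 1)]
--
--     # now logically we need to perform the BFS
--     while bfs_queue:
--         current_row, current_col = bfs_queue.popleft()
--         current_height = heights[current_row][current_col]
--
--         # now we need to explore neighbors
--         for dr, dc in directions:
--             neighbor_row, neighbor_col = current_row + dr, current_col + dc
--             #FUCKKKKK
--             # this shit checks if the neighbor is within bounds and unvisited
--             if 0 <= neighbor_row < rows and 0 <= neighbor_col < cols and heights[neighbor_row][neighbor_col] == -1:
--                 # now assign the height to the neighbor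
--                 heights[neighbor_row][neighbor_col] = current_height + 1
--                 bfs_queue.append((neighbor_row, neighbor_col))
--
--     return heights
-- ===== SOURCE B (Python) =====
-- from typing import List
--
-- def assignHeights(isWater: List[List[int]]) -> List[List[int]]:
--     # No obstacles: the BFS distance to the nearest water cell is exactly the
--     # minimum Manhattan distance to any water cell (-1 if there is no water).
--     rows = len(isWater)
--     cols = len(isWater[0])
--     waters = [(r, c) for r in range(rows) for c in range(cols) if isWater[r][c] == 1]
--
--     def dist(r, c):
--         if not waters:
--             return -1
--         best = abs(r - waters[0][0]) + abs(c - waters[0][1])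
--         for wr, wc in waters[1:]:
--             best = min(best, abs(r - wr) + abs(c - wc))
--         return best
--
--     return [[dist(r, c) for c in range(cols)] for r in range(rows)]
-- ===== Notes on version B (the rewrite author's own statement) =====
-- stated objective: alternative
-- what changed: Replaces the multi-source BFS with an explicit queue by a per-cell closed form: since the grid has no obstacles, the BFS distance equals the minimum Manhattan distance to any water cell, so B collects the water cells once and takes a min over them per cell (-1 if there is no water).
import Mathlib
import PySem

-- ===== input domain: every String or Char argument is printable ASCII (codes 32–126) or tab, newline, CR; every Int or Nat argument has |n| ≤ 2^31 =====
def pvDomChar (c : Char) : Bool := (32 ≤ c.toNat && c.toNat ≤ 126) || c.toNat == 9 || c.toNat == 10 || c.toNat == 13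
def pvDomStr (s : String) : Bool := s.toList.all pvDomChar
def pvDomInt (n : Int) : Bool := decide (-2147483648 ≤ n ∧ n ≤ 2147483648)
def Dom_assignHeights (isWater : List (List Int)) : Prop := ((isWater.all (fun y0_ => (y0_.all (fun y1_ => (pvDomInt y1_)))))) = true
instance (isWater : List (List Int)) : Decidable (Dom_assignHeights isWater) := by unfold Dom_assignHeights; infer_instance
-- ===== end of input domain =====

-- B replaces A's multi-source BFS by a per-cell minimum of Manhattan distances to the
-- water cells (valid because the grid has no obstacles); alternative algorithm, not faster.

-- ===== PORT A =====
-- heights[r][c] (indices A reads are always in range on Pre_; the defaults are irrelevant there)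
def pvGet2 (h : List (List Int)) (r c : Int) : Int :=
  PySem.List.pyGetD (PySem.List.pyGetD h r []) c 0
def pvSet2 (h : List (List Int)) (r c : Int) (v : Int) : List (List Int) :=
  PySem.List.pySetD h r (PySem.List.pySetD (PySem.List.pyGetD h r []) c v)

def pvDirs : List (Int × Int) := [(-1, 0), (1, 0), (0, -1), (0, 1)]

def pvVisit (rows cols ch : Int) (cur : Int × Int) (st : List (List Int) × List (Int × Int))
    (d : Int × Int) : List (List Int) × List (Int × Int) :=
  let nr := cur.1 + d.1
  let nc := cur.2 + d.2
  if 0 ≤ nr ∧ nr < rows ∧ 0 ≤ nc ∧ nc < cols ∧ pvGet2 st.1 nr nc = -1 then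
    (pvSet2 st.1 nr nc (ch + 1), st.2 ++ [(nr, nc)])
  else st

def pvStep (rows cols : Int) (st : List (List Int) × List (Int × Int)) (cur : Int × Int) :
    List (List Int) × List (Int × Int) :=
  pvDirs.foldl (pvVisit rows cols (pvGet2 st.1 cur.1 cur.2) cur) st

def pvLoop (rows cols : Int) : Nat → List (List Int) × List (Int × Int) → List (List Int)
  | 0, st => st.1
  | Nat.succ fuel, st =>
    match st.2 with
    | [] => st.1
    | cur :: q => pvLoop rows cols fuel (pvStep rows cols (st.1, q) cur)

def assignHeights (isWater : List (List Int)) : List (List Int) :=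
  let rows : Int := isWater.length
  let cols : Int := (PySem.List.pyGetD isWater 0 []).length
  let heights : List (List Int) := List.replicate rows.toNat (List.replicate cols.toNat (-1))
  let init := (PySem.List.pyRange 0 rows 1).foldl (fun st r =>
      (PySem.List.pyRange 0 cols 1).foldl
        (fun (st : List (List Int) × List (Int × Int)) c =>
          if pvGet2 isWater r c = 1 then (pvSet2 st.1 r c 0, st.2 ++ [(r, c)]) else st) st)
    (heights, ([] : List (Int × Int)))
  pvLoop rows cols (rows.toNat * cols.toNat + init.2.length + 1) init

-- ===== PORT B =====
def pvWaters (isWater : List (List Int)) (rows cols : Int) : List (Int × Int) :=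
  (PySem.List.pyRange 0 rows 1).flatMap (fun r =>
    (PySem.List.pyRange 0 cols 1).filterMap (fun c =>
      if pvGet2 isWater r c = 1 then some (r, c) else none))

def pvMinDist (ws : List (Int × Int)) (r c : Int) : Int :=
  match ws with
  | [] => -1
  | w :: t => t.foldl (fun m p => min m (|r - p.1| + |c - p.2|)) (|r - w.1| + |c - w.2|)

def assignHeights_alt (isWater : List (List Int)) : List (List Int) :=
  let rows : Int := isWater.length
  let cols : Int := (PySem.List.pyGetD isWater 0 []).length
  let ws := pvWaters isWater rows cols
  (PySem.List.pyRange 0 rows 1).map (fun r =>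
    (PySem.List.pyRange 0 cols 1).map (fun c => pvMinDist ws r c))

-- ===== PRECONDITION & SPEC =====
-- Pre_ excludes exactly the inputs on which Python A raises IndexError: the empty outer
-- list (isWater[0]) and grids in which some row is shorter than the first row (isWater[r][c]).
def Pre_assignHeights (isWater : List (List Int)) : Prop :=
  isWater ≠ [] ∧ ∀ row ∈ isWater, (isWater.headI).length ≤ row.length
instance (isWater : List (List Int)) : Decidable (Pre_assignHeights isWater) := by
  unfold Pre_assignHeights; infer_instance

def pvWitness_assignHeights : List (List Int) := [[0, 1], [0, 0]]

def Spec_assignHeights (isWater : List (List Int)) (out : List (List Int)) : Prop :=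
  out = assignHeights_alt isWater
instance (isWater : List (List Int)) (out : List (List Int)) :
    Decidable (Spec_assignHeights isWater out) := by unfold Spec_assignHeights; infer_instance

-- ===== CLAIM (what is proved, stated in full; the proofs are below) =====
def Claim_equal_assignHeights : Prop := ∀ (isWater : List (List Int)),
  Dom_assignHeights isWater → Pre_assignHeights isWater →
  Spec_assignHeights isWater (assignHeights isWater)

-- ===== LEMMAS AND PROOFS =====
theorem foldl_min_le_init (g : Int × Int → Int) (l : List (Int × Int)) (a : Int) :
    l.foldl (fun m p => min m (g p)) a ≤ a := by
  induction l generalizing a with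
  | nil => simp
  | cons x t ih => exact le_trans (ih _) (by simp)

theorem foldl_min_le_mem (g : Int × Int → Int) (l : List (Int × Int)) (a : Int)
    (x : Int × Int) (hx : x ∈ l) : l.foldl (fun m p => min m (g p)) a ≤ g x := by
  induction l generalizing a with
  | nil => simp at hx
  | cons y t ih =>
    rcases List.mem_cons.1 hx with h | h
    · subst h; exact le_trans (foldl_min_le_init g t _) (by simp)
    · exact ih _ h

theorem foldl_min_attain (g : Int × Int → Int) (l : List (Int × Int)) (a : Int) :
    l.foldl (fun m p => min m (g p)) a = a ∨ ∃ x ∈ l, l.foldl (fun m p => min m (g p)) a = g x := by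
  induction l generalizing a with
  | nil => left; rfl
  | cons y t ih =>
    rcases ih (min a (g y)) with h | ⟨x, hx, h⟩
    · rcases min_cases a (g y) with ⟨he, _⟩ | ⟨he, _⟩
      · left; simpa [List.foldl, he] using h
      · right; exact ⟨y, by simp, by simpa [List.foldl, he] using h⟩
    · right; exact ⟨x, by simp [hx], by simpa [List.foldl] using h⟩

theorem pvMinDist_le (W : List (Int × Int)) (r c : Int) (q : Int × Int) (hq : q ∈ W) :
    pvMinDist W r c ≤ |r - q.1| + |c - q.2| := by
  cases W with
  | nil => simp at hq
  | cons w t =>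
    rcases List.mem_cons.1 hq with h | h
    · subst h; exact foldl_min_le_init _ t _
    · exact foldl_min_le_mem _ t _ q h

theorem pvMinDist_attain (W : List (Int × Int)) (hW : W ≠ []) (r c : Int) :
    ∃ q ∈ W, pvMinDist W r c = |r - q.1| + |c - q.2| := by
  cases W with
  | nil => exact absurd rfl hW
  | cons w t =>
    rcases foldl_min_attain (fun p => |r - p.1| + |c - p.2|) t (|r - w.1| + |c - w.2|) with h | ⟨x, hx, h⟩
    · exact ⟨w, by simp, h⟩
    · exact ⟨x, by simp [hx], h⟩

theorem pvMinDist_nonneg (W : List (Int × Int)) (hW : W ≠ []) (r c : Int) :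
    0 ≤ pvMinDist W r c := by
  obtain ⟨q, _, h⟩ := pvMinDist_attain W hW r c
  rw [h]; positivity

theorem pvMinDist_mem_zero (W : List (Int × Int)) (r c : Int) (h : (r, c) ∈ W) :
    pvMinDist W r c = 0 := by
  have h1 := pvMinDist_le W r c (r, c) h
  have h2 := pvMinDist_nonneg W (by rintro rfl; simp at h) r c
  simp at h1; omega

theorem pvMinDist_zero_mem (W : List (Int × Int)) (hW : W ≠ []) (r c : Int)
    (h : pvMinDist W r c = 0) : (r, c) ∈ W := by
  obtain ⟨q, hq, he⟩ := pvMinDist_attain W hW r c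
  have : q = (r, c) := by
    have := he ▸ h
    have h1 : |r - q.1| = 0 ∧ |c - q.2| = 0 := by
      constructor <;> [skip; skip] <;>
        · have := abs_nonneg (r - q.1); have := abs_nonneg (c - q.2); omega
    obtain ⟨a1, a2⟩ := h1
    have := abs_eq_zero.1 a1; have := abs_eq_zero.1 a2
    exact Prod.ext (by omega) (by omega)
  rwa [this] at hq

theorem pvMinDist_lipschitz (W : List (Int × Int)) (hW : W ≠ []) (r c r' c' : Int) :
    pvMinDist W r' c' ≤ pvMinDist W r c + (|r - r'| + |c - c'|) := by
  obtain ⟨q, hq, he⟩ := pvMinDist_attain W hW r c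
  have h1 := pvMinDist_le W r' c' q hq
  have h2 : |r' - q.1| ≤ |r' - r| + |r - q.1| := abs_sub_le r' r q.1
  have h3 : |c' - q.2| ≤ |c' - c| + |c - q.2| := abs_sub_le c' c q.2
  have h4 : |r' - r| = |r - r'| := abs_sub_comm r' r
  have h5 : |c' - c| = |c - c'| := abs_sub_comm c' c
  linarith

def pvInGrid (R C : Int) (p : Int × Int) : Prop :=
  0 ≤ p.1 ∧ p.1 < R ∧ 0 ≤ p.2 ∧ p.2 < C
def pvShape (R C : Int) (h : List (List Int)) : Prop :=
  h.length = R.toNat ∧ ∀ row ∈ h, row.length = C.toNat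

theorem pvGet2_eq_getElem (R C : Int) (h : List (List Int)) (hs : pvShape R C h)
    (r c : Int) (hg : pvInGrid R C (r, c)) :
    ∃ (h1 : r.toNat < h.length) (h2 : c.toNat < (h[r.toNat]).length),
      pvGet2 h r c = h[r.toNat][c.toNat] := by
  obtain ⟨hlen, hrow⟩ := hs
  have a : 0 ≤ r := hg.1
  have b : r < R := hg.2.1
  have cc : 0 ≤ c := hg.2.2.1
  have d : c < C := hg.2.2.2
  have h1 : r.toNat < h.length := by omega
  have ha1 : r < (h.length : Int) := by simp [hlen]; omega
  have h2 : c.toNat < (h[r.toNat]).length := by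
    rw [hrow _ (List.getElem_mem h1)]; omega
  have hb1 : c < ((h[r.toNat] : List Int).length : Int) := by
    rw [hrow _ (List.getElem_mem h1)]; simp; omega
  refine ⟨h1, h2, ?_⟩
  unfold pvGet2
  rw [PySem.List.pyGetD_eq_getElem h [] a ha1, PySem.List.pyGetD_eq_getElem _ 0 cc hb1]

theorem pvShape_set2 (R C : Int) (h : List (List Int)) (hs : pvShape R C h)
    (r c v : Int) (hg : pvInGrid R C (r, c)) : pvShape R C (pvSet2 h r c v) := by
  obtain ⟨hlen, hrow⟩ := hs
  have a : 0 ≤ r := hg.1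
  have b : r < R := hg.2.1
  unfold pvSet2
  rw [PySem.List.pySetD_of_nonneg h _ a]
  constructor
  · simpa using hlen
  · intro row hr
    rcases List.mem_or_eq_of_mem_set hr with h' | h'
    · exact hrow _ h'
    · subst h'
      rw [PySem.List.pySetD_of_nonneg _ v hg.2.2.1, List.length_set]
      refine hrow _ (PySem.List.pyGetD_mem h [] ?_)
      constructor <;> [omega; (simp [hlen]; omega)]

theorem pvSet2_eq (h : List (List Int)) (r c v : Int) (hr : 0 ≤ r) (hc : 0 ≤ c)
    (h1 : r.toNat < h.length) :
    pvSet2 h r c v = h.set r.toNat ((h[r.toNat]).set c.toNat v) := by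
  unfold pvSet2
  rw [PySem.List.pySetD_of_nonneg h _ hr, PySem.List.pySetD_of_nonneg _ v hc,
      PySem.List.pyGetD_eq_getElem h [] hr (by omega)]

theorem pvGet2_set2_self (R C : Int) (h : List (List Int)) (hs : pvShape R C h)
    (r c v : Int) (hg : pvInGrid R C (r, c)) : pvGet2 (pvSet2 h r c v) r c = v := by
  obtain ⟨h1, h2, _⟩ := pvGet2_eq_getElem R C h hs r c hg
  obtain ⟨h1', h2', he⟩ := pvGet2_eq_getElem R C _ (pvShape_set2 R C h hs r c v hg) r c hg
  rw [he]
  simp only [pvSet2_eq h r c v hg.1 hg.2.2.1 h1]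
  simp

theorem pvGet2_set2_ne (R C : Int) (h : List (List Int)) (hs : pvShape R C h)
    (r c v r' c' : Int) (hg : pvInGrid R C (r, c)) (hg' : pvInGrid R C (r', c'))
    (hne : (r', c') ≠ (r, c)) : pvGet2 (pvSet2 h r c v) r' c' = pvGet2 h r' c' := by
  obtain ⟨h1, h2, he⟩ := pvGet2_eq_getElem R C h hs r' c' hg'
  obtain ⟨h1', h2', he'⟩ := pvGet2_eq_getElem R C _ (pvShape_set2 R C h hs r c v hg) r' c' hg'
  rw [he, he']
  have h1r : r.toNat < h.length := by
    have := hg.2.1; have := hg.1; have := hs.1; omega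
  simp only [pvSet2_eq h r c v hg.1 hg.2.2.1 h1r]
  by_cases hr : r.toNat = r'.toNat
  · have hcc : c.toNat ≠ c'.toNat := by
      intro hc; apply hne
      have := hg.1; have := hg.2.2.1; have := hg'.1; have := hg'.2.2.1
      exact Prod.ext (by omega) (by omega)
    simp [hr, hcc]
  · simp [hr]

theorem pvGet2_replicate (R C : Int) (r c : Int) (hg : pvInGrid R C (r, c)) :
    pvGet2 (List.replicate R.toNat (List.replicate C.toNat (-1))) r c = -1 := by
  have hs : pvShape R C (List.replicate R.toNat (List.replicate C.toNat (-1))) := by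
    constructor
    · simp
    · intro row hr; simp [List.eq_of_mem_replicate hr]
  obtain ⟨h1, h2, he⟩ := pvGet2_eq_getElem R C _ hs r c hg
  rw [he]
  simp [List.getElem_replicate]

def pvGrid (R C : Int) : List (Int × Int) :=
  (PySem.List.pyRange 0 R 1).flatMap fun r => (PySem.List.pyRange 0 C 1).map fun c => (r, c)

theorem mem_pvGrid (R C : Int) (p : Int × Int) : p ∈ pvGrid R C ↔ pvInGrid R C p := by
  cases p with
  | mk r c =>
    simp [pvGrid, List.mem_flatMap, PySem.List.mem_pyRange_one, pvInGrid]
    tauto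

theorem nodup_pvGrid (R C : Int) : (pvGrid R C).Nodup := by
  have : pvGrid R C = (PySem.List.pyRange 0 R 1) ×ˢ (PySem.List.pyRange 0 C 1) := rfl
  rw [this]
  exact List.Nodup.product (PySem.List.nodup_pyRange_one 0 R) (PySem.List.nodup_pyRange_one 0 C)

def pvUndisc (R C : Int) (h : List (List Int)) : Nat :=
  (pvGrid R C).countP fun p => pvGet2 h p.1 p.2 == -1

theorem countP_flip {α : Type} (l : List α) (hnd : l.Nodup) (x : α) (hx : x ∈ l)
    (p q : α → Bool) (hpx : p x = true) (hqx : q x = false)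
    (hagree : ∀ y ∈ l, y ≠ x → q y = p y) : l.countP q + 1 = l.countP p := by
  induction l with
  | nil => simp at hx
  | cons y t ih =>
    rcases List.mem_cons.1 hx with h | h
    · subst h
      have : t.countP q = t.countP p := by
        apply List.countP_congr
        intro z hz
        rw [hagree z (List.mem_cons_of_mem _ hz) (by rintro rfl; exact (List.nodup_cons.1 hnd).1 hz)]
      simp [hpx, hqx, this]
    · have hy : y ≠ x := by rintro rfl; exact (List.nodup_cons.1 hnd).1 h
      have := ih (List.nodup_cons.1 hnd).2 h (fun z hz hne => hagree z (List.mem_cons_of_mem _ hz) hne)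
      simp [List.countP_cons, hagree y (by simp) hy]
      omega

theorem pv_neg_mem_dirs (e : Int × Int) (he : e ∈ pvDirs) : (-e.1, -e.2) ∈ pvDirs := by
  simp [pvDirs] at he
  rcases he with he | he | he | he <;> subst he <;> decide

theorem pv_dirs_abs (e : Int × Int) (he : e ∈ pvDirs) : |e.1| + |e.2| = 1 := by
  simp [pvDirs] at he
  rcases he with he | he | he | he <;> subst he <;> decide

theorem pvMinDist_descent (W : List (Int × Int)) (R C : Int) (hW : W ≠ [])
    (hWg : ∀ p ∈ W, pvInGrid R C p) (r c : Int) (hg : pvInGrid R C (r, c))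
    (hpos : 1 ≤ pvMinDist W r c) :
    ∃ e ∈ pvDirs, pvInGrid R C (r + e.1, c + e.2) ∧
      pvMinDist W (r + e.1) (c + e.2) = pvMinDist W r c - 1 := by
  obtain ⟨q, hq, hD⟩ := pvMinDist_attain W hW r c
  have hqg := hWg q hq
  have hq1 : 0 ≤ q.1 := hqg.1
  have hq2 : q.1 < R := hqg.2.1
  have hq3 : 0 ≤ q.2 := hqg.2.2.1
  have hq4 : q.2 < C := hqg.2.2.2
  have hg1 : 0 ≤ r := hg.1
  have hg2 : r < R := hg.2.1
  have hg3 : 0 ≤ c := hg.2.2.1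
  have hg4 : c < C := hg.2.2.2
  have lip2 : ∀ (e : Int × Int), e ∈ pvDirs →
      pvMinDist W r c ≤ pvMinDist W (r + e.1) (c + e.2) + 1 := fun e he => by
    have hlp := pvMinDist_lipschitz W hW (r + e.1) (c + e.2) r c
    have ha := pv_dirs_abs e he
    have h1 : |r + e.1 - r| = |e.1| := by congr 1; ring
    have h2 : |c + e.2 - c| = |e.2| := by congr 1; ring
    rw [h1, h2] at hlp
    omega
  have key : ∀ (e : Int × Int), e ∈ pvDirs →
      pvMinDist W (r + e.1) (c + e.2) ≤ pvMinDist W r c - 1 →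
      pvMinDist W (r + e.1) (c + e.2) = pvMinDist W r c - 1 := fun e he hle => by
    have := lip2 e he; omega
  have hAr : 0 ≤ |r - q.1| := abs_nonneg _
  have hAc : 0 ≤ |c - q.2| := abs_nonneg _
  rcases lt_trichotomy q.1 r with h | h | h
  · refine ⟨(-1, 0), by decide, ⟨show 0 ≤ r + -1 by omega, show r + -1 < R by omega,
      show 0 ≤ c + 0 by omega, show c + 0 < C by omega⟩, ?_⟩
    apply key _ (by decide)
    show pvMinDist W (r + -1) (c + 0) ≤ pvMinDist W r c - 1
    have hle := pvMinDist_le W (r + -1) (c + 0) q hq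
    rw [abs_of_nonneg (show (0:Int) ≤ r - q.1 by omega)] at hD
    rw [show |r + -1 - q.1| = r - q.1 - 1 by rw [abs_of_nonneg (by omega)]; ring,
        show |c + 0 - q.2| = |c - q.2| by norm_num] at hle
    omega
  · rcases lt_trichotomy q.2 c with h2 | h2 | h2
    · refine ⟨(0, -1), by decide, ⟨show 0 ≤ r + 0 by omega, show r + 0 < R by omega,
        show 0 ≤ c + -1 by omega, show c + -1 < C by omega⟩, ?_⟩
      apply key _ (by decide)
      show pvMinDist W (r + 0) (c + -1) ≤ pvMinDist W r c - 1
      have hle := pvMinDist_le W (r + 0) (c + -1) q hq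
      rw [abs_of_nonneg (show (0:Int) ≤ c - q.2 by omega)] at hD
      rw [show |c + -1 - q.2| = c - q.2 - 1 by rw [abs_of_nonneg (by omega)]; ring,
          show |r + 0 - q.1| = |r - q.1| by norm_num] at hle
      omega
    · exfalso
      rw [h, h2] at hD
      simp at hD
      omega
    · refine ⟨(0, 1), by decide, ⟨show 0 ≤ r + 0 by omega, show r + 0 < R by omega,
        show 0 ≤ c + 1 by omega, show c + 1 < C by omega⟩, ?_⟩
      apply key _ (by decide)
      show pvMinDist W (r + 0) (c + 1) ≤ pvMinDist W r c - 1
      have hle := pvMinDist_le W (r + 0) (c + 1) q hq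
      rw [abs_of_nonpos (show c - q.2 ≤ (0:Int) by omega)] at hD
      rw [show |c + 1 - q.2| = q.2 - (c + 1) by rw [abs_of_nonpos (by omega)]; ring,
          show |r + 0 - q.1| = |r - q.1| by norm_num] at hle
      omega
  · refine ⟨(1, 0), by decide, ⟨show 0 ≤ r + 1 by omega, show r + 1 < R by omega,
      show 0 ≤ c + 0 by omega, show c + 0 < C by omega⟩, ?_⟩
    apply key _ (by decide)
    show pvMinDist W (r + 1) (c + 0) ≤ pvMinDist W r c - 1
    have hle := pvMinDist_le W (r + 1) (c + 0) q hq
    rw [abs_of_nonpos (show r - q.1 ≤ (0:Int) by omega)] at hD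
    rw [show |r + 1 - q.1| = q.1 - (r + 1) by rw [abs_of_nonpos (by omega)]; ring,
        show |c + 0 - q.2| = |c - q.2| by norm_num] at hle
    omega

structure pvInv (W : List (Int × Int)) (R C : Int) (h : List (List Int))
    (q : List (Int × Int)) (d : Int) : Prop where
  shape : pvShape R C h
  correct : ∀ p, pvInGrid R C p → pvGet2 h p.1 p.2 ≠ -1 →
    pvGet2 h p.1 p.2 = pvMinDist W p.1 p.2
  water : ∀ p ∈ W, pvGet2 h p.1 p.2 ≠ -1
  closed : ∀ p, pvInGrid R C p → pvGet2 h p.1 p.2 ≠ -1 → p ∉ q →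
    ∀ e ∈ pvDirs, pvInGrid R C (p.1 + e.1, p.2 + e.2) →
      pvGet2 h (p.1 + e.1) (p.2 + e.2) ≠ -1
  qok : ∀ p ∈ q, pvInGrid R C p ∧ pvGet2 h p.1 p.2 ≠ -1
  levels : ∃ q1 q2, q = q1 ++ q2 ∧ (∀ p ∈ q1, pvMinDist W p.1 p.2 = d) ∧
    (∀ p ∈ q2, pvMinDist W p.1 p.2 = d + 1)

theorem pv_undisc_ge (W : List (Int × Int)) (R C : Int) (h : List (List Int))
    (q : List (Int × Int)) (b : Int) (hW : W ≠ []) (hWg : ∀ p ∈ W, pvInGrid R C p)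
    (hwater : ∀ p ∈ W, pvGet2 h p.1 p.2 ≠ -1)
    (hclosed : ∀ p, pvInGrid R C p → pvGet2 h p.1 p.2 ≠ -1 → p ∉ q →
      ∀ e ∈ pvDirs, pvInGrid R C (p.1 + e.1, p.2 + e.2) →
        pvGet2 h (p.1 + e.1) (p.2 + e.2) ≠ -1)
    (hq : ∀ p ∈ q, b ≤ pvMinDist W p.1 p.2) :
    ∀ p, pvInGrid R C p → pvGet2 h p.1 p.2 = -1 → b + 1 ≤ pvMinDist W p.1 p.2 := by
  suffices H : ∀ n (p : Int × Int), pvInGrid R C p → pvGet2 h p.1 p.2 = -1 →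
      (pvMinDist W p.1 p.2).toNat = n → b + 1 ≤ pvMinDist W p.1 p.2 by
    intro p hgp hup; exact H _ p hgp hup rfl
  intro n
  induction n using Nat.strong_induction_on with
  | _ n ih =>
    intro p hgp hup hn
    have hnn := pvMinDist_nonneg W hW p.1 p.2
    by_cases h0 : pvMinDist W p.1 p.2 = 0
    · exfalso
      have hm : (p.1, p.2) ∈ W := pvMinDist_zero_mem W hW p.1 p.2 h0
      exact hwater _ hm hup
    · obtain ⟨e, he, hgne, hdne⟩ := pvMinDist_descent W R C hW hWg p.1 p.2
        (by cases p; exact hgp) (by omega)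
      set p' : Int × Int := (p.1 + e.1, p.2 + e.2) with hp'
      by_cases hdisc : pvGet2 h p'.1 p'.2 = -1
      · have hlt : (pvMinDist W p'.1 p'.2).toNat < n := by
          simp only [hp'] at hdne ⊢; omega
        have := ih _ hlt p' hgne hdisc rfl
        simp only [hp'] at this hdne ⊢
        omega
      · by_cases hmem : p' ∈ q
        · have := hq p' hmem
          simp only [hp'] at this hdne; omega
        · exfalso
          have hback := hclosed p' hgne hdisc hmem (-e.1, -e.2) (pv_neg_mem_dirs e he)
          have hpe1 : p'.1 + (-e.1, -e.2).1 = p.1 := by simp [hp']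
          have hpe2 : p'.2 + (-e.1, -e.2).2 = p.2 := by simp [hp']
          rw [hpe1, hpe2] at hback
          exact hback (by cases p; exact hgp) hup

def pvMid (W : List (Int × Int)) (R C d : Int) (h : List (List Int)) (rest : List (Int × Int))
    (st : List (List Int) × List (Int × Int)) : Prop :=
  pvShape R C st.1 ∧
  ∃ new, st.2 = rest ++ new ∧
    (∀ p ∈ new, pvInGrid R C p ∧ pvGet2 st.1 p.1 p.2 = d + 1 ∧ pvMinDist W p.1 p.2 = d + 1) ∧
    (∀ p : Int × Int, pvInGrid R C p → pvGet2 st.1 p.1 p.2 = pvGet2 h p.1 p.2 ∨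
      (p ∈ new ∧ pvGet2 h p.1 p.2 = -1)) ∧
    pvUndisc R C st.1 + new.length = pvUndisc R C h

set_option maxHeartbeats 1000000 in
theorem pv_visit (W : List (Int × Int)) (R C : Int) (h : List (List Int))
    (rest : List (Int × Int)) (d : Int) (cur e : Int × Int)
    (hW : W ≠ []) (hWg : ∀ p ∈ W, pvInGrid R C p)
    (inv : pvInv W R C h (cur :: rest) d)
    (hcur : pvMinDist W cur.1 cur.2 = d)
    (hd0 : 0 ≤ d)
    (hrest : ∀ p ∈ rest, d ≤ pvMinDist W p.1 p.2)
    (he : e ∈ pvDirs)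
    (st : List (List Int) × List (Int × Int))
    (hmid : pvMid W R C d h rest st) :
    pvMid W R C d h rest (pvVisit R C d cur st e) ∧
    (∀ p : Int × Int, pvInGrid R C p → pvGet2 st.1 p.1 p.2 ≠ -1 →
      pvGet2 (pvVisit R C d cur st e).1 p.1 p.2 = pvGet2 st.1 p.1 p.2) ∧
    (pvInGrid R C (cur.1 + e.1, cur.2 + e.2) →
      pvGet2 (pvVisit R C d cur st e).1 (cur.1 + e.1) (cur.2 + e.2) ≠ -1) := by
  obtain ⟨hsh, new, hq, hnew, hM2, hcount⟩ := hmid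
  by_cases hc : 0 ≤ cur.1 + e.1 ∧ cur.1 + e.1 < R ∧ 0 ≤ cur.2 + e.2 ∧ cur.2 + e.2 < C ∧
      pvGet2 st.1 (cur.1 + e.1) (cur.2 + e.2) = -1
  · have hgu : pvInGrid R C (cur.1 + e.1, cur.2 + e.2) := ⟨hc.1, hc.2.1, hc.2.2.1, hc.2.2.2.1⟩
    have hu_st : pvGet2 st.1 (cur.1 + e.1) (cur.2 + e.2) = -1 := hc.2.2.2.2
    have hres1 : (pvVisit R C d cur st e).1 =
        pvSet2 st.1 (cur.1 + e.1) (cur.2 + e.2) (d + 1) := by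
      simp only [pvVisit, if_pos hc]
    have hres2 : (pvVisit R C d cur st e).2 =
        st.2 ++ [(cur.1 + e.1, cur.2 + e.2)] := by
      simp only [pvVisit, if_pos hc]
    have hu_h : pvGet2 h (cur.1 + e.1) (cur.2 + e.2) = -1 := by
      rcases hM2 _ hgu with h' | h'
      · rwa [h'] at hu_st
      · exact h'.2
    have hub : pvMinDist W (cur.1 + e.1) (cur.2 + e.2) ≤ d + 1 := by
      have hlp := pvMinDist_lipschitz W hW cur.1 cur.2 (cur.1 + e.1) (cur.2 + e.2)
      have ha := pv_dirs_abs e he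
      have h1 : |cur.1 - (cur.1 + e.1)| = |e.1| := by rw [abs_sub_comm]; congr 1; ring
      have h2 : |cur.2 - (cur.2 + e.2)| = |e.2| := by rw [abs_sub_comm]; congr 1; ring
      rw [h1, h2] at hlp
      omega
    have hlb : d + 1 ≤ pvMinDist W (cur.1 + e.1) (cur.2 + e.2) := by
      have hqb : ∀ p ∈ cur :: rest, d ≤ pvMinDist W p.1 p.2 := by
        intro p hp
        rcases List.mem_cons.1 hp with h' | h'
        · subst h'; omega
        · exact hrest p h'
      exact pv_undisc_ge W R C h (cur :: rest) d hW hWg inv.water inv.closed hqb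
        (cur.1 + e.1, cur.2 + e.2) hgu hu_h
    have hDu : pvMinDist W (cur.1 + e.1) (cur.2 + e.2) = d + 1 := le_antisymm hub hlb
    have hsh' : pvShape R C (pvSet2 st.1 (cur.1 + e.1) (cur.2 + e.2) (d + 1)) :=
      pvShape_set2 R C st.1 hsh _ _ _ hgu
    have hself := pvGet2_set2_self R C st.1 hsh (cur.1 + e.1) (cur.2 + e.2) (d + 1) hgu
    have hpers : ∀ p : Int × Int, pvInGrid R C p → pvGet2 st.1 p.1 p.2 ≠ -1 →
        pvGet2 (pvSet2 st.1 (cur.1 + e.1) (cur.2 + e.2) (d + 1)) p.1 p.2 = pvGet2 st.1 p.1 p.2 := by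
      intro p hgp hdp
      have hne : (p.1, p.2) ≠ (cur.1 + e.1, cur.2 + e.2) := by
        intro hcontra
        have h1 : p.1 = cur.1 + e.1 := congrArg Prod.fst hcontra
        have h2 : p.2 = cur.2 + e.2 := congrArg Prod.snd hcontra
        rw [h1, h2] at hdp
        exact hdp hu_st
      exact pvGet2_set2_ne R C st.1 hsh (cur.1 + e.1) (cur.2 + e.2) (d + 1) p.1 p.2 hgu (by cases p; exact hgp) hne
    refine ⟨⟨?_, new ++ [(cur.1 + e.1, cur.2 + e.2)], ?_, ?_, ?_, ?_⟩, ?_, ?_⟩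
    · rw [hres1]; exact hsh'
    · rw [hres2, hq, List.append_assoc]
    · intro p hp
      rw [hres1]
      rcases List.mem_append.1 hp with h' | h'
      · obtain ⟨hg1, hv1, hd1⟩ := hnew p h'
        refine ⟨hg1, ?_, hd1⟩
        rw [hpers p hg1 (by rw [hv1]; omega)]
        exact hv1
      · simp at h'
        subst h'
        exact ⟨hgu, hself, hDu⟩
    · intro p hgp
      rw [hres1]
      by_cases hpu : p = (cur.1 + e.1, cur.2 + e.2)
      · subst hpu; exact Or.inr ⟨by simp, hu_h⟩
      · rcases hM2 p hgp with h' | h'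
        · left
          rw [← h']
          exact pvGet2_set2_ne R C st.1 hsh (cur.1 + e.1) (cur.2 + e.2) (d + 1) p.1 p.2 hgu (by cases p; exact hgp)
            (by cases p; simpa using hpu)
        · exact Or.inr ⟨List.mem_append_left _ h'.1, h'.2⟩
    · rw [hres1]
      simp only [List.length_append, List.length_cons, List.length_nil]
      have hflip : (pvGrid R C).countP
            (fun p => pvGet2 (pvSet2 st.1 (cur.1 + e.1) (cur.2 + e.2) (d + 1)) p.1 p.2 == -1) + 1 =
          (pvGrid R C).countP (fun p => pvGet2 st.1 p.1 p.2 == -1) := by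
        refine countP_flip (pvGrid R C) (nodup_pvGrid R C) (cur.1 + e.1, cur.2 + e.2)
          ((mem_pvGrid R C _).2 hgu) _ _ ?_ ?_ ?_
        · simpa using hu_st
        · simp only [hself]; simp; omega
        · intro y hy hyne
          have hgy := (mem_pvGrid R C y).1 hy
          have := pvGet2_set2_ne R C st.1 hsh (cur.1 + e.1) (cur.2 + e.2) (d + 1) y.1 y.2 hgu (by cases y; exact hgy)
            (by cases y; simpa using hyne)
          simp only [this]
      unfold pvUndisc at hcount ⊢
      omega
    · intro p hgp hdp
      rw [hres1]
      exact hpers p hgp hdp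
    · intro _
      rw [hres1, hself]
      omega
  · have hres1 : (pvVisit R C d cur st e).1 = st.1 := by
      simp only [pvVisit, if_neg hc]
    have hres2 : (pvVisit R C d cur st e).2 = st.2 := by
      simp only [pvVisit, if_neg hc]
    refine ⟨⟨?_, new, ?_, ?_, ?_, ?_⟩, ?_, ?_⟩
    · rw [hres1]; exact hsh
    · rw [hres2]; exact hq
    · intro p hp; rw [hres1]; exact hnew p hp
    · intro p hgp; rw [hres1]; exact hM2 p hgp
    · rw [hres1]; exact hcount
    · intro p _ _; rw [hres1]
    · intro hgn
      rw [hres1]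
      intro hcontra
      exact hc ⟨hgn.1, hgn.2.1, hgn.2.2.1, hgn.2.2.2, hcontra⟩

set_option maxHeartbeats 1000000 in
theorem pv_step (W : List (Int × Int)) (R C : Int) (h : List (List Int))
    (cur : Int × Int) (rest : List (Int × Int)) (d : Int)
    (hW : W ≠ []) (hWg : ∀ p ∈ W, pvInGrid R C p)
    (inv : pvInv W R C h (cur :: rest) d)
    (hcur : pvMinDist W cur.1 cur.2 = d)
    (hlev : ∃ r1 r2, rest = r1 ++ r2 ∧ (∀ p ∈ r1, pvMinDist W p.1 p.2 = d) ∧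
      (∀ p ∈ r2, pvMinDist W p.1 p.2 = d + 1)) :
    pvInv W R C (pvStep R C (h, rest) cur).1 (pvStep R C (h, rest) cur).2 d ∧
    (pvStep R C (h, rest) cur).2.length + pvUndisc R C (pvStep R C (h, rest) cur).1 + 1
      = (cur :: rest).length + pvUndisc R C h := by
  have hd0 : 0 ≤ d := hcur ▸ pvMinDist_nonneg W hW cur.1 cur.2
  obtain ⟨r1, r2, hr, hr1, hr2⟩ := hlev
  have hrest : ∀ p ∈ rest, d ≤ pvMinDist W p.1 p.2 := by
    intro p hp
    rw [hr] at hp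
    rcases List.mem_append.1 hp with h' | h'
    · rw [hr1 p h']
    · rw [hr2 p h']; omega
  have hgc : pvInGrid R C cur := (inv.qok cur (by simp)).1
  have hch : pvGet2 h cur.1 cur.2 = d := by
    rw [inv.correct cur hgc (inv.qok cur (by simp)).2, hcur]
  have hstep : pvStep R C (h, rest) cur =
      pvVisit R C d cur (pvVisit R C d cur (pvVisit R C d cur
        (pvVisit R C d cur (h, rest) (-1, 0)) (1, 0)) (0, -1)) (0, 1) := by
    simp only [pvStep, pvDirs, List.foldl_cons, List.foldl_nil]
    rw [show pvGet2 (h, rest).1 cur.1 cur.2 = d from hch]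
  have mid0 : pvMid W R C d h rest (h, rest) :=
    ⟨inv.shape, [], by simp, by simp, fun p _ => Or.inl rfl, by simp⟩
  obtain ⟨mid1, pers1, n1⟩ := pv_visit W R C h rest d cur (-1, 0) hW hWg inv hcur hd0 hrest
    (by decide) (h, rest) mid0
  obtain ⟨mid2, pers2, n2⟩ := pv_visit W R C h rest d cur (1, 0) hW hWg inv hcur hd0 hrest
    (by decide) _ mid1
  obtain ⟨mid3, pers3, n3⟩ := pv_visit W R C h rest d cur (0, -1) hW hWg inv hcur hd0 hrest
    (by decide) _ mid2
  obtain ⟨mid4, pers4, n4⟩ := pv_visit W R C h rest d cur (0, 1) hW hWg inv hcur hd0 hrest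
    (by decide) _ mid3
  rw [← hstep] at mid4 pers4 n4
  obtain ⟨sh4, new, hq4, hnew4, hM24, hcnt4⟩ := mid4
  have pers_final : ∀ p : Int × Int, pvInGrid R C p → pvGet2 h p.1 p.2 ≠ -1 →
      pvGet2 (pvStep R C (h, rest) cur).1 p.1 p.2 ≠ -1 := by
    intro p hgp hdp
    rcases hM24 p hgp with h' | h'
    · rw [h']; exact hdp
    · rw [(hnew4 p h'.1).2.1]; omega
  have n1f : pvInGrid R C (cur.1 + (-1 : Int), cur.2 + (0 : Int)) →
      pvGet2 (pvStep R C (h, rest) cur).1 (cur.1 + (-1 : Int)) (cur.2 + (0 : Int)) ≠ -1 := by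
    intro hgn
    have v1 := n1 hgn
    have v2 := pers2 _ hgn v1
    have v3 := pers3 _ hgn (by rw [v2]; exact v1)
    have v4 := pers4 _ hgn (by rw [v3, v2]; exact v1)
    rw [v4, v3, v2]
    exact v1
  have n2f : pvInGrid R C (cur.1 + (1 : Int), cur.2 + (0 : Int)) →
      pvGet2 (pvStep R C (h, rest) cur).1 (cur.1 + (1 : Int)) (cur.2 + (0 : Int)) ≠ -1 := by
    intro hgn
    have v2 := n2 hgn
    have v3 := pers3 _ hgn v2
    have v4 := pers4 _ hgn (by rw [v3]; exact v2)
    rw [v4, v3]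
    exact v2
  have n3f : pvInGrid R C (cur.1 + (0 : Int), cur.2 + (-1 : Int)) →
      pvGet2 (pvStep R C (h, rest) cur).1 (cur.1 + (0 : Int)) (cur.2 + (-1 : Int)) ≠ -1 := by
    intro hgn
    have v3 := n3 hgn
    have v4 := pers4 _ hgn v3
    rw [v4]
    exact v3
  have n4f : pvInGrid R C (cur.1 + (0 : Int), cur.2 + (1 : Int)) →
      pvGet2 (pvStep R C (h, rest) cur).1 (cur.1 + (0 : Int)) (cur.2 + (1 : Int)) ≠ -1 := n4
  refine ⟨⟨sh4, ?_, ?_, ?_, ?_, ?_⟩, ?_⟩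
  · intro p hgp hdp
    rcases hM24 p hgp with h' | h'
    · rw [h']
      exact inv.correct p hgp (by rw [← h']; exact hdp)
    · rw [(hnew4 p h'.1).2.1, (hnew4 p h'.1).2.2]
  · intro p hpW
    exact pers_final p (hWg p hpW) (inv.water p hpW)
  · intro p hgp hdp hnin e' he' hgn'
    rcases hM24 p hgp with heq | hmem
    · have hdh : pvGet2 h p.1 p.2 ≠ -1 := by rw [← heq]; exact hdp
      by_cases hpc : p = cur
      · subst hpc
        obtain ⟨e1, e2⟩ := e'
        have he'' := he'
        simp only [pvDirs, List.mem_cons, List.not_mem_nil, or_false, Prod.mk.injEq] at he''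
        rcases he'' with ⟨rfl, rfl⟩ | ⟨rfl, rfl⟩ | ⟨rfl, rfl⟩ | ⟨rfl, rfl⟩
        · exact n1f hgn'
        · exact n2f hgn'
        · exact n3f hgn'
        · exact n4f hgn'
      · have hnin_old : p ∉ cur :: rest := by
          intro hmem'
          rcases List.mem_cons.1 hmem' with h'' | h''
          · exact hpc h''
          · exact hnin (by rw [hq4]; exact List.mem_append_left _ h'')
        have hnbr := inv.closed p hgp hdh hnin_old e' he' hgn'
        exact pers_final _ hgn' hnbr
    · exfalso
      exact hnin (by rw [hq4]; exact List.mem_append_right _ hmem.1)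
  · intro p hp
    rw [hq4] at hp
    rcases List.mem_append.1 hp with h' | h'
    · have hold := inv.qok p (List.mem_cons_of_mem _ h')
      exact ⟨hold.1, pers_final p hold.1 hold.2⟩
    · have := hnew4 p h'
      exact ⟨this.1, by rw [this.2.1]; omega⟩
  · refine ⟨r1, r2 ++ new, by rw [hq4, hr, List.append_assoc], hr1, ?_⟩
    intro p hp
    rcases List.mem_append.1 hp with h' | h'
    · exact hr2 p h'
    · exact (hnew4 p h').2.2
  · rw [hq4]
    simp only [List.length_append, List.length_cons]
    omega

theorem pv_pop (W : List (Int × Int)) (R C : Int) (h : List (List Int))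
    (cur : Int × Int) (rest : List (Int × Int)) (d : Int)
    (inv : pvInv W R C h (cur :: rest) d) :
    ∃ e, pvInv W R C h (cur :: rest) e ∧ pvMinDist W cur.1 cur.2 = e ∧
      ∃ r1 r2, rest = r1 ++ r2 ∧ (∀ p ∈ r1, pvMinDist W p.1 p.2 = e) ∧
        (∀ p ∈ r2, pvMinDist W p.1 p.2 = e + 1) := by
  obtain ⟨q1, q2, hsplit, hq1, hq2⟩ := inv.levels
  cases q1 with
  | nil =>
    simp only [List.nil_append] at hsplit
    refine ⟨d + 1, ⟨inv.shape, inv.correct, inv.water, inv.closed, inv.qok,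
      ⟨cur :: rest, [], by simp, ?_, by simp⟩⟩, ?_, rest, [], by simp, ?_, by simp⟩
    · intro p hp; exact hq2 p (hsplit ▸ hp)
    · exact hq2 cur (hsplit ▸ List.mem_cons_self)
    · intro p hp; exact hq2 p (hsplit ▸ List.mem_cons_of_mem _ hp)
  | cons c1 t1 =>
    rw [List.cons_append] at hsplit
    have hc1 : cur = c1 := (List.cons.injEq _ _ _ _ ▸ hsplit).1
    have ht1 : rest = t1 ++ q2 := (List.cons.injEq _ _ _ _ ▸ hsplit).2
    refine ⟨d, inv, ?_, t1, q2, ht1, fun p hp => hq1 p (List.mem_cons_of_mem _ hp), hq2⟩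
    rw [hc1]
    exact hq1 c1 List.mem_cons_self

theorem pv_loop (W : List (Int × Int)) (R C : Int) (hW : W ≠ [])
    (hWg : ∀ p ∈ W, pvInGrid R C p) :
    ∀ (fuel : Nat) (h : List (List Int)) (q : List (Int × Int)) (d : Int),
      pvInv W R C h q d → q.length + pvUndisc R C h < fuel →
      pvShape R C (pvLoop R C fuel (h, q)) ∧
      ∀ p, pvInGrid R C p → pvGet2 (pvLoop R C fuel (h, q)) p.1 p.2 = pvMinDist W p.1 p.2 := by
  intro fuel
  induction fuel with
  | zero => intro h q d inv hf; omega
  | succ f ih =>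
    intro h q d inv hf
    cases q with
    | nil =>
      have hL : pvLoop R C (f + 1) (h, []) = h := rfl
      rw [hL]
      refine ⟨inv.shape, ?_⟩
      intro p hgp
      by_cases hdp : pvGet2 h p.1 p.2 = -1
      · exfalso
        have := pv_undisc_ge W R C h [] (pvMinDist W p.1 p.2) hW hWg inv.water inv.closed
          (by simp) p hgp hdp
        omega
      · exact inv.correct p hgp hdp
    | cons cur rest =>
      obtain ⟨e, inv', hcur, hlev⟩ := pv_pop W R C h cur rest d inv
      obtain ⟨inv2, hcnt⟩ := pv_step W R C h cur rest e hW hWg inv' hcur hlev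
      have hL : pvLoop R C (f + 1) (h, cur :: rest) = pvLoop R C f (pvStep R C (h, rest) cur) := rfl
      rw [hL]
      have hbound : (pvStep R C (h, rest) cur).2.length +
          pvUndisc R C (pvStep R C (h, rest) cur).1 < f := by
        simp only [List.length_cons] at hcnt hf
        omega
      exact ih (pvStep R C (h, rest) cur).1 (pvStep R C (h, rest) cur).2 e inv2 hbound

theorem init_inner (isWater : List (List Int)) (R C : Int) (r : Int)
    (hr0 : 0 ≤ r) (hrR : r < R) :
    ∀ (n : Nat) (a : Int), (C - a).toNat = n → 0 ≤ a →
    ∀ (h : List (List Int)) (q : List (Int × Int)), pvShape R C h →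
      pvShape R C ((PySem.List.pyRange a C 1).foldl
        (fun (st : List (List Int) × List (Int × Int)) c =>
          if pvGet2 isWater r c = 1 then (pvSet2 st.1 r c 0, st.2 ++ [(r, c)]) else st) (h, q)).1 ∧
      ((PySem.List.pyRange a C 1).foldl
        (fun (st : List (List Int) × List (Int × Int)) c =>
          if pvGet2 isWater r c = 1 then (pvSet2 st.1 r c 0, st.2 ++ [(r, c)]) else st) (h, q)).2
        = q ++ (PySem.List.pyRange a C 1).filterMap
            (fun c => if pvGet2 isWater r c = 1 then some (r, c) else none) ∧
      ∀ p : Int × Int, pvInGrid R C p →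
        pvGet2 ((PySem.List.pyRange a C 1).foldl
          (fun (st : List (List Int) × List (Int × Int)) c =>
            if pvGet2 isWater r c = 1 then (pvSet2 st.1 r c 0, st.2 ++ [(r, c)]) else st) (h, q)).1 p.1 p.2
          = if p.1 = r ∧ a ≤ p.2 ∧ pvGet2 isWater r p.2 = 1 then 0 else pvGet2 h p.1 p.2 := by
  intro n
  induction n with
  | zero =>
    intro a hn ha h q hs
    rw [PySem.List.pyRange_one_eq_nil (by omega)]
    refine ⟨hs, by simp, ?_⟩
    intro p hgp
    rw [if_neg ?_]
    · rfl
    · rintro ⟨-, hge, -⟩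
      have := hgp.2.2.2
      omega
  | succ n ih =>
    intro a hn ha h q hs
    have haC : a < C := by omega
    rw [PySem.List.pyRange_one_cons haC, List.foldl_cons]
    have hga : pvInGrid R C (r, a) := ⟨hr0, hrR, ha, haC⟩
    by_cases hw : pvGet2 isWater r a = 1
    · rw [show (if pvGet2 isWater r a = 1 then (pvSet2 (h, q).1 r a 0, (h, q).2 ++ [(r, a)])
          else (h, q)) = (pvSet2 h r a 0, q ++ [(r, a)]) from by simp [hw]]
      obtain ⟨s1, s2, s3⟩ := ih (a + 1) (by omega) (by omega) (pvSet2 h r a 0) (q ++ [(r, a)])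
        (pvShape_set2 R C h hs r a 0 hga)
      refine ⟨s1, ?_, ?_⟩
      · rw [s2, List.filterMap_cons]
        simp [hw]
      · intro p hgp
        rw [s3 p hgp]
        by_cases hpa : p.1 = r ∧ p.2 = a
        · obtain ⟨h1, h2⟩ := hpa
          rw [if_neg (by rintro ⟨-, hge, -⟩; omega),
              if_pos ⟨h1, by omega, by rw [h2]; exact hw⟩, h1, h2]
          exact pvGet2_set2_self R C h hs r a 0 hga
        · have hne : (p.1, p.2) ≠ (r, a) := by
            intro hcontra
            exact hpa ⟨congrArg Prod.fst hcontra, congrArg Prod.snd hcontra⟩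
          rw [pvGet2_set2_ne R C h hs r a 0 p.1 p.2 hga (by cases p; exact hgp) hne]
          by_cases hcond : p.1 = r ∧ a ≤ p.2 ∧ pvGet2 isWater r p.2 = 1
          · rw [if_pos ⟨hcond.1, by
                have : p.2 ≠ a := fun hc => hpa ⟨hcond.1, hc⟩
                omega, hcond.2.2⟩, if_pos hcond]
          · rw [if_neg (fun hc => hcond ⟨hc.1, by omega, hc.2.2⟩), if_neg hcond]
    · rw [show (if pvGet2 isWater r a = 1 then (pvSet2 (h, q).1 r a 0, (h, q).2 ++ [(r, a)])
          else (h, q)) = (h, q) from by simp [hw]]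
      obtain ⟨s1, s2, s3⟩ := ih (a + 1) (by omega) (by omega) h q hs
      refine ⟨s1, ?_, ?_⟩
      · rw [s2, List.filterMap_cons]
        simp [hw]
      · intro p hgp
        rw [s3 p hgp]
        by_cases hcond : p.1 = r ∧ a ≤ p.2 ∧ pvGet2 isWater r p.2 = 1
        · have hp2a : p.2 ≠ a := by
            intro hc
            rw [hc] at hcond
            exact hw hcond.2.2
          rw [if_pos ⟨hcond.1, by omega, hcond.2.2⟩, if_pos hcond]
        · rw [if_neg (fun hc => hcond ⟨hc.1, by omega, hc.2.2⟩), if_neg hcond]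

theorem init_outer (isWater : List (List Int)) (R C : Int) :
    ∀ (n : Nat) (b : Int), (R - b).toNat = n → 0 ≤ b →
    ∀ (h : List (List Int)) (q : List (Int × Int)), pvShape R C h →
      pvShape R C ((PySem.List.pyRange b R 1).foldl (fun st r =>
        (PySem.List.pyRange 0 C 1).foldl
          (fun (st : List (List Int) × List (Int × Int)) c =>
            if pvGet2 isWater r c = 1 then (pvSet2 st.1 r c 0, st.2 ++ [(r, c)]) else st) st) (h, q)).1 ∧
      ((PySem.List.pyRange b R 1).foldl (fun st r =>
        (PySem.List.pyRange 0 C 1).foldl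
          (fun (st : List (List Int) × List (Int × Int)) c =>
            if pvGet2 isWater r c = 1 then (pvSet2 st.1 r c 0, st.2 ++ [(r, c)]) else st) st) (h, q)).2
        = q ++ (PySem.List.pyRange b R 1).flatMap (fun r =>
            (PySem.List.pyRange 0 C 1).filterMap
              (fun c => if pvGet2 isWater r c = 1 then some (r, c) else none)) ∧
      ∀ p : Int × Int, pvInGrid R C p →
        pvGet2 ((PySem.List.pyRange b R 1).foldl (fun st r =>
          (PySem.List.pyRange 0 C 1).foldl
            (fun (st : List (List Int) × List (Int × Int)) c =>
              if pvGet2 isWater r c = 1 then (pvSet2 st.1 r c 0, st.2 ++ [(r, c)]) else st) st) (h, q)).1 p.1 p.2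
          = if b ≤ p.1 ∧ pvGet2 isWater p.1 p.2 = 1 then 0 else pvGet2 h p.1 p.2 := by
  intro n
  induction n with
  | zero =>
    intro b hn hb h q hs
    rw [PySem.List.pyRange_one_eq_nil (show R ≤ b by omega)]
    refine ⟨hs, by simp, ?_⟩
    intro p hgp
    rw [if_neg ?_]
    · rfl
    · rintro ⟨hge, -⟩
      have := hgp.2.1
      omega
  | succ n ih =>
    intro b hn hb h q hs
    have hbR : b < R := by omega
    rw [PySem.List.pyRange_one_cons hbR, List.foldl_cons]
    obtain ⟨t1, t2, t3⟩ := init_inner isWater R C b hb hbR C.toNat 0 (by simp) le_rfl h q hs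
    set st1 := (PySem.List.pyRange 0 C 1).foldl
      (fun (st : List (List Int) × List (Int × Int)) c =>
        if pvGet2 isWater b c = 1 then (pvSet2 st.1 b c 0, st.2 ++ [(b, c)]) else st) (h, q) with hst1
    obtain ⟨s1, s2, s3⟩ := ih (b + 1) (by omega) (by omega) st1.1 st1.2 t1
    rw [← Prod.mk.eta (p := st1)]
    refine ⟨s1, ?_, ?_⟩
    · rw [s2, t2, List.flatMap_cons, ← List.append_assoc]
    · intro p hgp
      rw [s3 p hgp]
      by_cases hc : b ≤ p.1 ∧ pvGet2 isWater p.1 p.2 = 1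
      · by_cases hpb : p.1 = b
        · rw [if_neg (by rintro ⟨hge, -⟩; omega), t3 p hgp,
              if_pos ⟨hpb, hgp.2.2.1, by rw [← hpb]; exact hc.2⟩, if_pos hc]
        · rw [if_pos ⟨by omega, hc.2⟩, if_pos hc]
      · rw [if_neg (fun hh => hc ⟨by omega, hh.2⟩), t3 p hgp,
            if_neg (fun hh => hc ⟨by rw [hh.1], by rw [hh.1]; exact hh.2.2⟩), if_neg hc]

theorem mem_pvWaters (isWater : List (List Int)) (R C : Int) (p : Int × Int) :
    p ∈ pvWaters isWater R C ↔ pvInGrid R C p ∧ pvGet2 isWater p.1 p.2 = 1 := by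
  obtain ⟨a, b⟩ := p
  simp only [pvWaters, List.mem_flatMap, List.mem_filterMap, PySem.List.mem_pyRange_one]
  constructor
  · rintro ⟨r, hr, c, hc, hif⟩
    by_cases hw : pvGet2 isWater r c = 1
    · rw [if_pos hw] at hif
      have h1 : r = a := congrArg Prod.fst (Option.some.inj hif)
      have h2 : c = b := congrArg Prod.snd (Option.some.inj hif)
      subst h1; subst h2
      exact ⟨⟨hr.1, hr.2, hc.1, hc.2⟩, hw⟩
    · rw [if_neg hw] at hif
      simp at hif
  · rintro ⟨⟨h1, h2, h3, h4⟩, hw⟩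
    refine ⟨a, ⟨h1, h2⟩, b, ⟨h3, h4⟩, ?_⟩
    rw [if_pos hw]

theorem pvShape_replicate (R C : Int) :
    pvShape R C (List.replicate R.toNat (List.replicate C.toNat (-1))) := by
  constructor
  · simp
  · intro row hr
    simp [List.eq_of_mem_replicate hr]

theorem length_pvGrid (R C : Int) : (pvGrid R C).length = R.toNat * C.toNat := by
  simp [pvGrid, List.length_flatMap, PySem.List.length_pyRange_one, List.map_const']

theorem pvUndisc_le (R C : Int) (h : List (List Int)) :
    pvUndisc R C h ≤ R.toNat * C.toNat := by
  rw [← length_pvGrid R C]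
  exact List.countP_le_length

theorem pv_init_inv (isWater : List (List Int)) (R C : Int) (h0 : List (List Int))
    (hs : pvShape R C h0)
    (hv : ∀ p : Int × Int, pvInGrid R C p →
      pvGet2 h0 p.1 p.2 = if pvGet2 isWater p.1 p.2 = 1 then 0 else -1) :
    pvInv (pvWaters isWater R C) R C h0 (pvWaters isWater R C) 0 := by
  have hmemW : ∀ p : Int × Int, p ∈ pvWaters isWater R C ↔
      pvInGrid R C p ∧ pvGet2 isWater p.1 p.2 = 1 := mem_pvWaters isWater R C
  have hdst0 : ∀ p : Int × Int, p ∈ pvWaters isWater R C → pvMinDist (pvWaters isWater R C) p.1 p.2 = 0 := by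
    intro p hp
    exact pvMinDist_mem_zero _ p.1 p.2 (by rw [Prod.mk.eta]; exact hp)
  refine ⟨hs, ?_, ?_, ?_, ?_, ⟨pvWaters isWater R C, [], by simp, hdst0, by simp⟩⟩
  · intro p hgp hdp
    rw [hv p hgp] at hdp ⊢
    by_cases hw : pvGet2 isWater p.1 p.2 = 1
    · rw [if_pos hw]
      rw [hdst0 p ((hmemW p).2 ⟨hgp, hw⟩)]
    · rw [if_neg hw] at hdp
      exact absurd rfl hdp
  · intro p hp
    obtain ⟨hgp, hw⟩ := (hmemW p).1 hp
    rw [hv p hgp, if_pos hw]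
    omega
  · intro p hgp hdp hnin
    exfalso
    rw [hv p hgp] at hdp
    by_cases hw : pvGet2 isWater p.1 p.2 = 1
    · exact hnin ((hmemW p).2 ⟨hgp, hw⟩)
    · rw [if_neg hw] at hdp
      exact hdp rfl
  · intro p hp
    obtain ⟨hgp, hw⟩ := (hmemW p).1 hp
    refine ⟨hgp, ?_⟩
    rw [hv p hgp, if_pos hw]
    omega

theorem pv_final_ext (R C : Int) (res : List (List Int)) (f : Int → Int → Int)
    (hsh : pvShape R C res)
    (hval : ∀ p : Int × Int, pvInGrid R C p → pvGet2 res p.1 p.2 = f p.1 p.2) :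
    res = (PySem.List.pyRange 0 R 1).map (fun r =>
      (PySem.List.pyRange 0 C 1).map (fun c => f r c)) := by
  apply List.ext_getElem
  · rw [hsh.1]
    simp [PySem.List.length_pyRange_one]
  · intro i h1 h2
    rw [List.getElem_map, PySem.List.getElem_pyRange_one]
    apply List.ext_getElem
    · rw [hsh.2 res[i] (List.getElem_mem h1)]
      simp [PySem.List.length_pyRange_one]
    · intro j h3 h4
      rw [List.getElem_map, PySem.List.getElem_pyRange_one]
      have hiR : (i : Int) < R := by
        have := h1
        rw [hsh.1] at this
        omega
    
      have hjC : (j : Int) < C := by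
        have := h3
        rw [hsh.2 res[i] (List.getElem_mem h1)] at this
        omega
      have hgp : pvInGrid R C ((i : Int), (j : Int)) :=
        ⟨Int.natCast_nonneg i, hiR, Int.natCast_nonneg j, hjC⟩
      obtain ⟨hh1, hh2, he⟩ := pvGet2_eq_getElem R C res hsh (i : Int) (j : Int) hgp
      have hval' := hval ((i : Int), (j : Int)) hgp
      rw [he] at hval'
      simp only [Int.toNat_natCast] at hval'
      rw [show (0 : Int) + (i : Int) = (i : Int) by ring, show (0 : Int) + (j : Int) = (j : Int) by ring]
      exact hval'

theorem pv_main (isWater : List (List Int)) :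
    assignHeights isWater = assignHeights_alt isWater := by
  have hshape0 := pvShape_replicate (isWater.length : Int)
    ((PySem.List.pyGetD isWater 0 []).length : Int)
  obtain ⟨S1, S2, S3⟩ := init_outer isWater (isWater.length : Int)
    ((PySem.List.pyGetD isWater 0 []).length : Int)
    ((isWater.length : Int)).toNat 0 (by simp) le_rfl
    (List.replicate ((isWater.length : Int)).toNat
      (List.replicate (((PySem.List.pyGetD isWater 0 []).length : Int)).toNat (-1)))
    [] hshape0
  set R : Int := (isWater.length : Int) with hRdef
  set C : Int := ((PySem.List.pyGetD isWater 0 []).length : Int) with hCdef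
  set I := (PySem.List.pyRange 0 R 1).foldl (fun st r =>
      (PySem.List.pyRange 0 C 1).foldl
        (fun (st : List (List Int) × List (Int × Int)) c =>
          if pvGet2 isWater r c = 1 then (pvSet2 st.1 r c 0, st.2 ++ [(r, c)]) else st) st)
    (List.replicate R.toNat (List.replicate C.toNat (-1)), ([] : List (Int × Int))) with hI
  have hq0 : I.2 = pvWaters isWater R C := by
    rw [S2]
    simp only [List.nil_append]
    rfl
  have hv0 : ∀ p : Int × Int, pvInGrid R C p →
      pvGet2 I.1 p.1 p.2 = if pvGet2 isWater p.1 p.2 = 1 then 0 else -1 := by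
    intro p hgp
    rw [S3 p hgp]
    by_cases hw : pvGet2 isWater p.1 p.2 = 1
    · rw [if_pos ⟨hgp.1, hw⟩, if_pos hw]
    · rw [if_neg (fun hc => hw hc.2), if_neg hw]
      exact pvGet2_replicate R C p.1 p.2 hgp
  have hA : assignHeights isWater = pvLoop R C (R.toNat * C.toNat + I.2.length + 1) I := rfl
  have hB : assignHeights_alt isWater = (PySem.List.pyRange 0 R 1).map (fun r =>
      (PySem.List.pyRange 0 C 1).map (fun c => pvMinDist (pvWaters isWater R C) r c)) := rfl
  rw [hA, hB]
  have hIeta : I = (I.1, I.2) := (Prod.mk.eta).symm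
  by_cases hW : pvWaters isWater R C = []
  · have hq0' : I.2 = [] := by rw [hq0, hW]
    rw [hIeta, hq0']
    rw [show pvLoop R C (R.toNat * C.toNat + List.length ([] : List (Int × Int)) + 1)
      (I.1, ([] : List (Int × Int))) = I.1 from rfl]
    apply pv_final_ext R C I.1 _ S1
    intro p hgp
    rw [hv0 p hgp, hW]
    by_cases hw : pvGet2 isWater p.1 p.2 = 1
    · exfalso
      have hmem := (mem_pvWaters isWater R C p).2 ⟨hgp, hw⟩
      rw [hW] at hmem
      simp at hmem
    · rw [if_neg hw]
      rfl
  · have hWg : ∀ p ∈ pvWaters isWater R C, pvInGrid R C p :=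
      fun p hp => ((mem_pvWaters isWater R C p).1 hp).1
    have inv0 := pv_init_inv isWater R C I.1 S1 hv0
    rw [hIeta, hq0]
    have hfb : (pvWaters isWater R C).length + pvUndisc R C I.1
        < R.toNat * C.toNat + (pvWaters isWater R C).length + 1 := by
      have := pvUndisc_le R C I.1
      omega
    obtain ⟨hshF, hvalF⟩ := pv_loop (pvWaters isWater R C) R C hW hWg
      (R.toNat * C.toNat + (pvWaters isWater R C).length + 1) I.1 (pvWaters isWater R C) 0 inv0 hfb
    exact pv_final_ext R C _ _ hshF hvalF

-- ===== VERDICT (by name: the statement is the Claim_ definition above) =====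
theorem assignHeights_spec : Claim_equal_assignHeights := by
  intro isWater _ _
  unfold Spec_assignHeights
  exact pv_main isWater
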